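-- pv_equiv track=rewrite | github.com/SudeeptoBhakat/talentscout | core/gibberish_detector.py | _max_consonant_run
-- ===== SOURCE A (Python) =====
-- from typing import FrozenSet, List, Optional, Tuple
--
-- _VOWELS: FrozenSet[str] = frozenset("aeiouAEIOU")
--
-- def _max_consonant_run(word: str) -> int:
--     """Maximum number of consecutive consonant characters."""
--     max_run = run = 0
--     for c in word.lower():
--         if c.isalpha() and c not in _VOWELS:
--             run += 1
--             max_run = max(max_run, run)
--         else:
--             run = 0
--     return max_run
-- ===== SOURCE B (Python) =====
-- from typing import FrozenSet
--
-- _VOWELS: FrozenSet[str] = frozenset("aeiouAEIOU")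
--
-- def _max_consonant_run(word: str) -> int:
--     """Maximum number of consecutive consonant characters (two-pointer run scan)."""
--     s = word.lower()
--     n = len(s)
--     best = 0
--     i = 0
--     while i < n:
--         if s[i].isalpha() and s[i] not in _VOWELS:
--             j = i + 1
--             while j < n and s[j].isalpha() and s[j] not in _VOWELS:
--                 j += 1
--             if j - i > best:
--                 best = j - i
--             i = j
--         else:
--             i += 1
--     return best
-- ===== Notes on version B (the rewrite author's own statement) =====
-- stated objective: alternative
-- what changed: Replaced the per-character running-counter/reset fold with a two-pointer run scan: an inner loop consumes each maximal consonant run at once and the outer loop compares whole run lengths.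
import Mathlib
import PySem

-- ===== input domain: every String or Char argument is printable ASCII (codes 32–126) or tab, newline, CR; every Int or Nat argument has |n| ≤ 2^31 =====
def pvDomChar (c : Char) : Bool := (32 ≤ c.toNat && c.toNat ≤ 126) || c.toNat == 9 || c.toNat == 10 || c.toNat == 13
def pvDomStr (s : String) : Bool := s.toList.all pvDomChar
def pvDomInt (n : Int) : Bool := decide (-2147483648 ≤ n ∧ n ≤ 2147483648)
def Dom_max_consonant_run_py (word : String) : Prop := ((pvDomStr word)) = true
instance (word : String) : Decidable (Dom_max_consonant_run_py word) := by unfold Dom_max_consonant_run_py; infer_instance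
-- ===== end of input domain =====

-- B replaces A's running-counter/reset fold by a two-pointer scan that consumes each
-- maximal consonant run at once (objective: alternative decomposition, same O(n) cost).

-- shared character classification: c.isalpha() and c not in _VOWELS
def pvVowels : List Char := ['a','e','i','o','u','A','E','I','O','U']
def pvIsCons (c : Char) : Bool := PySem.Chars.isalpha c && !(pvVowels.contains c)

-- ===== PORT A =====
def max_consonant_run_py (word : String) : Int :=
  ((PySem.Str.lower word).toList.foldl
    (fun (st : Int × Int) c =>
      if pvIsCons c then (max st.1 (st.2 + 1), st.2 + 1) else (st.1, 0))
    (0, 0)).1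

-- ===== PORT B =====
-- inner while loop of B: length of the leading consonant run and the remainder
def pvSpan : List Char → Int × List Char
  | [] => (0, [])
  | c :: cs => if pvIsCons c then ((pvSpan cs).1 + 1, (pvSpan cs).2) else (0, c :: cs)

theorem pvSpan_len (cs : List Char) : (pvSpan cs).2.length ≤ cs.length := by
  induction cs with
  | nil => simp [pvSpan]
  | cons c cs ih => simp only [pvSpan]; split <;> simp_all <;> omega

-- outer while loop of B, with the running best
def pvScan (best : Int) (l : List Char) : Int :=
  match l with
  | [] => best
  | c :: cs =>
    if pvIsCons c then
      pvScan (if (pvSpan cs).1 + 1 > best then (pvSpan cs).1 + 1 else best) (pvSpan cs).2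
    else pvScan best cs
termination_by l.length
decreasing_by
  · have := pvSpan_len cs; simp; omega
  · simp

def max_consonant_run_py_alt (word : String) : Int :=
  pvScan 0 (PySem.Str.lower word).toList

-- ===== PRECONDITION & SPEC =====
def Spec_max_consonant_run_py (word : String) (out : Int) : Prop := out = max_consonant_run_py_alt word
instance (word : String) (out : Int) : Decidable (Spec_max_consonant_run_py word out) := by unfold Spec_max_consonant_run_py; infer_instance

-- ===== CLAIM (what is proved, stated in full; the proofs are below) =====
def Claim_equal_max_consonant_run_py : Prop := ∀ (word : String), Dom_max_consonant_run_py word → Spec_max_consonant_run_py word (max_consonant_run_py word)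

-- ===== LEMMAS AND PROOFS =====

-- proof-only helper: the maximum consonant-run length, recursion on runs
def pvBpure (l : List Char) : Int :=
  match l with
  | [] => 0
  | c :: cs =>
    if pvIsCons c then max ((pvSpan cs).1 + 1) (pvBpure (pvSpan cs).2)
    else pvBpure cs
termination_by l.length
decreasing_by
  · have := pvSpan_len cs; simp; omega
  · simp

-- proof-only helper: A's continuation with a run of length r in progress
def pvF (r : Int) : List Char → Int
  | [] => r
  | c :: cs => if pvIsCons c then pvF (r + 1) cs else max r (pvBpure cs)

theorem pvSpan_fst_nonneg (cs : List Char) : 0 ≤ (pvSpan cs).1 := by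
  induction cs with
  | nil => simp [pvSpan]
  | cons c cs ih => simp only [pvSpan]; split <;> simp_all <;> omega

theorem pvBpure_nonneg_aux (n : Nat) : ∀ l : List Char, l.length ≤ n → 0 ≤ pvBpure l := by
  induction n with
  | zero =>
    intro l hl
    match l with
    | [] => simp [pvBpure]
  | succ n ih =>
    intro l hl
    match l with
    | [] => simp [pvBpure]
    | c :: cs =>
      rw [pvBpure]
      split
      · have h1 := pvSpan_fst_nonneg cs
        have h2 := ih (pvSpan cs).2 (by have := pvSpan_len cs; simp at hl; omega)
        omega
      · exact ih cs (by simp at hl; omega)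

theorem pvBpure_nonneg (l : List Char) : 0 ≤ pvBpure l :=
  pvBpure_nonneg_aux l.length l (le_refl _)

theorem pvBpure_cons_false {c : Char} (cs : List Char) (h : pvIsCons c = false) :
    pvBpure (c :: cs) = pvBpure cs := by
  rw [pvBpure]; simp [h]

theorem pvBpure_span (l : List Char) :
    pvBpure l = max (pvSpan l).1 (pvBpure (pvSpan l).2) := by
  match l with
  | [] => simp [pvBpure, pvSpan]
  | c :: cs =>
    rw [pvSpan]
    by_cases h : pvIsCons c
    · rw [if_pos h, pvBpure]
      simp [h]
    · rw [if_neg h]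
      show pvBpure (c :: cs) = max 0 (pvBpure (c :: cs))
      have := pvBpure_nonneg (c :: cs)
      omega

theorem pvF_span (cs : List Char) : ∀ r : Int, 0 ≤ r →
    pvF r cs = max (r + (pvSpan cs).1) (pvBpure (pvSpan cs).2) := by
  induction cs with
  | nil => intro r hr; simp [pvF, pvSpan, pvBpure]; omega
  | cons c cs ih =>
    intro r hr
    rw [pvF, pvSpan]
    by_cases h : pvIsCons c
    · rw [if_pos h, if_pos h]
      show pvF (r + 1) cs = max (r + ((pvSpan cs).1 + 1)) (pvBpure (pvSpan cs).2)
      rw [ih (r + 1) (by omega)]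
      have := pvSpan_fst_nonneg cs
      omega
    · rw [if_neg h, if_neg h]
      show max r (pvBpure cs) = max (r + 0) (pvBpure (c :: cs))
      rw [pvBpure_cons_false cs (by simp [h])]
      omega

theorem pvF_ge (cs : List Char) : ∀ r : Int, r ≤ pvF r cs := by
  induction cs with
  | nil => intro r; simp [pvF]
  | cons c cs ih =>
    intro r
    rw [pvF]
    split
    · have := ih (r + 1); omega
    · omega

theorem pvFold_eq (cs : List Char) : ∀ m r : Int, 0 ≤ r → r ≤ m →
    (cs.foldl (fun (st : Int × Int) c =>
        if pvIsCons c then (max st.1 (st.2 + 1), st.2 + 1) else (st.1, 0)) (m, r)).1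
      = max m (pvF r cs) := by
  induction cs with
  | nil => intro m r h0 hrm; simp [pvF]; omega
  | cons c cs ih =>
    intro m r h0 hrm
    simp only [List.foldl_cons]
    rw [pvF]
    split
    · rw [ih (max m (r + 1)) (r + 1) (by omega) (by omega)]
      have := pvF_ge cs (r + 1)
      omega
    · rw [ih m 0 (by omega) (by omega)]
      rw [pvF_span cs 0 (by omega)]
      have hb := pvBpure_span cs
      have := pvBpure_nonneg (pvSpan cs).2
      have := pvSpan_fst_nonneg cs
      omega

theorem pvScan_eq_aux (n : Nat) : ∀ l : List Char, l.length ≤ n → ∀ best : Int, 0 ≤ best →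
    pvScan best l = max best (pvBpure l) := by
  induction n with
  | zero =>
    intro l hl best h
    match l with
    | [] => simp [pvScan, pvBpure]; omega
  | succ n ih =>
    intro l hl best h
    match l with
    | [] => simp [pvScan, pvBpure]; omega
    | c :: cs =>
      rw [pvScan, pvBpure]
      split
      · have hs := pvSpan_fst_nonneg cs
        rw [ih (pvSpan cs).2 (by have := pvSpan_len cs; simp at hl; omega)
              _ (by split <;> omega)]
        have := pvBpure_nonneg (pvSpan cs).2
        split <;> omega
      · exact ih cs (by simp at hl; omega) best h

theorem pv_main (l : List Char) :
    (l.foldl (fun (st : Int × Int) c =>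
        if pvIsCons c then (max st.1 (st.2 + 1), st.2 + 1) else (st.1, 0)) (0, 0)).1
      = pvScan 0 l := by
  rw [pvFold_eq l 0 0 (by omega) (by omega),
      pvScan_eq_aux l.length l (le_refl _) 0 (by omega)]
  rw [pvF_span l 0 (by omega), pvBpure_span l]
  simp

-- ===== VERDICT (by name: the statement is the Claim_ definition above) =====
theorem max_consonant_run_py_spec : Claim_equal_max_consonant_run_py := by
  intro word _
  unfold Spec_max_consonant_run_py max_consonant_run_py max_consonant_run_py_alt
  exact pv_main _
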